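-- pv_equiv track=rewrite | github.com/sbricenoi/fixeatAI | mcp/server_demo.py | _normalize_entity
-- ===== SOURCE A (Python) =====
-- from typing import Any, List, Optional
--
-- def _normalize_entity(value: Optional[str], mapping: dict[str, list[str]]) -> Optional[str]:
--     if not value:
--         return None
--     val = value.strip().lower()
--     for canonical, aliases in (mapping or {}).items():
--         if val == canonical.lower() or val in [a.lower() for a in aliases]:
--             return canonical
--     return value
-- ===== SOURCE B (Python) =====
-- def _normalize_entity(value, mapping):
--     if not value:
--         return None
--     # Flatten the mapping back-to-front into (lowered key, canonical) pairs;
--     # dict() keeps the LAST occurrence of a key, so the earliest canonical wins.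
--     pairs = [(k.lower(), c)
--              for c, aliases in reversed(list((mapping or {}).items()))
--              for k in (c, *aliases)]
--     return dict(pairs).get(value.strip().lower(), value)
-- ===== Notes on version B (the rewrite author's own statement) =====
-- stated objective: alternative
-- what changed: Instead of A's per-item scan with early return, B flattens reversed(mapping.items()) into (lowered key, canonical) pairs and builds a dict from them, so last-write-wins overwriting reproduces A's first-match priority; one final lookup with the original value as default replaces the branching loop.
import Mathlib
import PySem

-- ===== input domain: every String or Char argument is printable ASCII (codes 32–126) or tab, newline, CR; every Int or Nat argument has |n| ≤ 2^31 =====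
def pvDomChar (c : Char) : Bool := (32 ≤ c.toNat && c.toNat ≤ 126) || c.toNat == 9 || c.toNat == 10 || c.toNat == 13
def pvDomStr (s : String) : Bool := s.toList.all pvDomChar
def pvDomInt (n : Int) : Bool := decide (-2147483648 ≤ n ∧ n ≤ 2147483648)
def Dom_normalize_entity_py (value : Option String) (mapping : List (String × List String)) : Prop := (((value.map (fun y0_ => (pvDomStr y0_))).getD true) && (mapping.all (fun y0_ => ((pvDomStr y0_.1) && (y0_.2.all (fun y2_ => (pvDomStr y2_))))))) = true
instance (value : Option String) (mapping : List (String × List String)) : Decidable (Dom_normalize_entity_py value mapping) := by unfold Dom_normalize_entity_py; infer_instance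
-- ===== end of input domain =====

-- B replaces A's per-item branching scan with a back-to-front flattening of the mapping into
-- (lowered key, canonical) pairs fed to dict() (last write wins = first canonical wins), then one lookup; same cost, alternative algorithm.


-- ===== PORT A =====
-- A's for-loop with early return: scan the items, return the first canonical that matches.
def pvScanA (val : String) : List (String × List String) → Option String
  | [] => none
  | (canonical, aliases) :: rest =>
    if val = PySem.Str.lower canonical ∨ val ∈ aliases.map PySem.Str.lower then some canonical
    else pvScanA val rest

def normalize_entity_py (value : Option String) (mapping : List (String × List String)) : Option String :=
  match value with
  | none => none
  | some v =>
    if v = "" then none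
    else
      let val := PySem.Str.lower (PySem.Str.strip v)
      match pvScanA val mapping with
      | some canonical => some canonical
      | none => some v

-- ===== PORT B =====
def normalize_entity_py_alt (value : Option String) (mapping : List (String × List String)) : Option String :=
  match value with
  | none => none
  | some v =>
    if v = "" then none
    else
      -- the flattening comprehension over reversed(mapping.items())
      let pairs := mapping.reverse.flatMap
        (fun it => (it.1 :: it.2).map (fun k => (PySem.Str.lower k, it.1)))
      -- dict(pairs).get(value.strip().lower(), value)
      some ((PySem.Dict.ofList pairs).getD (PySem.Str.lower (PySem.Str.strip v)) v)

-- ===== PRECONDITION & SPEC =====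
def Spec_normalize_entity_py (value : Option String) (mapping : List (String × List String)) (out : Option String) : Prop := out = normalize_entity_py_alt value mapping
instance (value : Option String) (mapping : List (String × List String)) (out : Option String) : Decidable (Spec_normalize_entity_py value mapping out) := by unfold Spec_normalize_entity_py; infer_instance

-- ===== CLAIM (what is proved, stated in full; the proofs are below) =====
def Claim_equal_normalize_entity_py : Prop := ∀ (value : Option String) (mapping : List (String × List String)), Dom_normalize_entity_py value mapping → Spec_normalize_entity_py value mapping (normalize_entity_py value mapping)

-- ===== LEMMAS AND PROOFS =====

-- inserting one item's pairs (all carrying the same canonical c) into d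
lemma get?_item_insert (c val : String) (ks : List String) (d : PySem.Dict String String) :
    ((ks.map (fun k => (PySem.Str.lower k, c))).foldl (fun a p => a.insert p.1 p.2) d).get? val
      = if val ∈ ks.map PySem.Str.lower then some c else d.get? val := by
  induction ks generalizing d with
  | nil => simp
  | cons k ks ih =>
    simp only [List.map_cons, List.foldl_cons, ih, PySem.Dict.get?_insert, List.mem_cons]
    by_cases h1 : val ∈ ks.map PySem.Str.lower <;> by_cases h2 : val = PySem.Str.lower k <;>
      simp [h1, h2]

-- the reversed flattened build looks up to exactly what A's scan returns, else d's prior value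
lemma get?_build (val : String) (ms : List (String × List String)) (d : PySem.Dict String String) :
    ((ms.reverse.flatMap (fun it => (it.1 :: it.2).map (fun k => (PySem.Str.lower k, it.1)))).foldl
        (fun a p => a.insert p.1 p.2) d).get? val
      = (pvScanA val ms).or (d.get? val) := by
  induction ms generalizing d with
  | nil => simp [pvScanA]
  | cons m ms ih =>
    obtain ⟨c, al⟩ := m
    simp only [List.reverse_cons, List.flatMap_append, List.foldl_append,
      List.flatMap_cons, List.flatMap_nil, List.append_nil]
    rw [get?_item_insert, ih]
    simp only [pvScanA, List.map_cons, List.mem_cons]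
    by_cases h : val = PySem.Str.lower c ∨ val ∈ List.map PySem.Str.lower al
    · rw [if_pos h, if_pos h, Option.some_or]
    · rw [if_neg h, if_neg h]

-- ===== VERDICT (by name: the statement is the Claim_ definition above) =====
theorem normalize_entity_py_spec : Claim_equal_normalize_entity_py := by
  intro value mapping _
  unfold Spec_normalize_entity_py normalize_entity_py normalize_entity_py_alt
  cases value with
  | none => rfl
  | some v =>
    by_cases hv : v = ""
    · simp [hv]
    · simp only [hv]
      rw [PySem.Dict.getD, PySem.Dict.ofList, PySem.Dict.update, get?_build]
      simp only [PySem.Dict.get?_empty, Option.or_none]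
      cases pvScanA (PySem.Str.lower (PySem.Str.strip v)) mapping <;> rfl
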